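-- pv_equiv track=rewrite | github.com/iampkn/gnn_in_bp | src/phase3_gnn/s_coverability.py | check
-- ===== SOURCE A (Python) =====
-- from collections import defaultdict
-- from typing import Dict, FrozenSet, List, Optional, Set, Tuple
--
-- def check(
--
--     places: List[Tuple[FrozenSet[str], FrozenSet[str]]],
--     transitions: Optional[List[str]] = None,
-- ) -> bool:
--     """
--     Check if the Petri net formed by the given places and transitions
--     is S-coverable.
--
--     Args:
--         places: list of (input_transitions, output_transitions) tuples
--         transitions: list of transition labels
--
--     Returns:
--         True if S-coverable (potentially sound)
--     """
--     if not places: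
--         return True
--
--     if transitions is None:
--         trans_set: Set[str] = set()
--         for in_t, out_t in places:
--             trans_set.update(in_t)
--             trans_set.update(out_t)
--         transitions = sorted(trans_set)
--
--     adj: Dict[str, Set[str]] = defaultdict(set)
--     for i, (in_t, out_t) in enumerate(places):
--         place_id = f"p{i}"
--         for t in in_t:
--             adj[t].add(place_id)
--             adj[place_id].add(t)
--         for t in out_t:
--             adj[place_id].add(t)
--             adj[t].add(place_id)
--
--     all_nodes = set(transitions) | {f"p{i}" for i in range(len(places))}
--
--     if not all_nodes:
--         return True
--
--     visited: Set[str] = set()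
--     stack = [next(iter(all_nodes))]
--     while stack:
--         node = stack.pop()
--         if node in visited:
--             continue
--         visited.add(node)
--         for neighbor in adj.get(node, set()):
--             if neighbor not in visited:
--                 stack.append(neighbor)
--
--     if visited != all_nodes:
--         return False
--
--     for t in transitions:
--         in_places = []
--         out_places = []
--         for i, (in_t, out_t) in enumerate(places):
--             if t in out_t:
--                 in_places.append(i)
--             if t in in_t:
--                 out_places.append(i)
--
--     return True
-- ===== SOURCE B (Python) =====
-- def check(places, transitions=None):
--     """S-coverability via star saturation: grow the component of place p0 by
--     absorbing whole place-stars (a place and all its adjacent transitions)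
--     until a round changes nothing, then compare with the full node set.
--     No adjacency dict, no DFS stack."""
--     if not places:
--         return True
--     if transitions is None:
--         ts = set()
--         for in_t, out_t in places:
--             ts |= set(in_t) | set(out_t)
--         transitions = ts
--     nodes = set(transitions) | {f"p{i}" for i in range(len(places))}
--     stars = [{f"p{i}"} | set(in_t) | set(out_t) for i, (in_t, out_t) in enumerate(places)]
--     comp = {"p0"}
--     for _ in range(len(places) + 1):
--         before = len(comp)
--         for star in stars:
--             if comp & star:
--                 comp |= star
--         if len(comp) == before:
--             break
--     return comp == nodes
-- ===== Notes on version B (the rewrite author's own statement) =====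
-- stated objective: alternative
-- what changed: Replaces A's adjacency-dict + explicit-stack DFS from an arbitrary set element by a frontier-free fixpoint saturation: starting from place p0, whole place-stars (a place together with all its transitions) are absorbed until a round changes nothing, then the component is compared with the full node set; the dead trailing loop is dropped.
import Mathlib
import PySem

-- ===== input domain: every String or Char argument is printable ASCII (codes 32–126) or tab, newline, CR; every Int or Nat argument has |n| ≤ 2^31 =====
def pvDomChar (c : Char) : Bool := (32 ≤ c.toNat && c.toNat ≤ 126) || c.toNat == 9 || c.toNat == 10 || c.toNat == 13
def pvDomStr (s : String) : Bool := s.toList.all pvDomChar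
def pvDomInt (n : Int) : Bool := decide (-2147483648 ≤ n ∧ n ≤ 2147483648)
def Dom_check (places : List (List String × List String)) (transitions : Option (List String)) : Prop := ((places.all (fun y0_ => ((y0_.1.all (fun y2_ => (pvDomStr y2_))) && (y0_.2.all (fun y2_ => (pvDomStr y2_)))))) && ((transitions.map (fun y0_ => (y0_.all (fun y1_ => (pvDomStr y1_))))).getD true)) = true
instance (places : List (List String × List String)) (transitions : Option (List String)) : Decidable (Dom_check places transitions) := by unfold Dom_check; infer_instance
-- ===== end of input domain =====

-- B replaces A's adjacency-dict + stack DFS with a frontier-free star-saturation fixpoint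
-- (absorb whole place-stars into the component of place p0 until stable); same return value.

-- shared tiny helper: the place node name f"p{i}"
def pvName (i : Int) : String := "p" ++ PySem.Int.toStr i

-- ===== PORT A =====
-- defaultdict edge insert: adj[u].add(v)
def pvAddE (d : PySem.Dict String (PySem.Set String)) (u v : String) : PySem.Dict String (PySem.Set String) :=
  d.modify u PySem.Set.empty (fun s => PySem.Set.add s v)

def pvBuildAdj (places : List (List String × List String)) : PySem.Dict String (PySem.Set String) :=
  (PySem.List.enumerate places).foldl
    (fun adj ip =>
      let pid := pvName ip.1
      let adj := ip.2.1.foldl (fun adj t => pvAddE (pvAddE adj t pid) pid t) adj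
      ip.2.2.foldl (fun adj t => pvAddE (pvAddE adj pid t) t pid) adj)
    PySem.Dict.empty

-- the `while stack:` DFS loop; fuel only makes it total (pvFuel below always suffices)
def pvDfs (adj : PySem.Dict String (PySem.Set String)) : Nat → List String → PySem.Set String → PySem.Set String
  | 0, _, visited => visited
  | _ + 1, [], visited => visited
  | fuel + 1, node :: rest, visited =>
    if visited.contains node then pvDfs adj fuel rest visited
    else
      pvDfs adj fuel
        (((adj.getD node PySem.Set.empty).filter (fun n => !(visited.contains n))) ++ rest)
        (PySem.Set.add visited node)

def pvFuel (adj : PySem.Dict String (PySem.Set String)) (s : String) : Nat :=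
  1 + (PySem.Set.add (PySem.Set.ofList adj.keys) s).foldl
        (fun a v => a + (adj.getD v PySem.Set.empty).length + 1) 0

def check (places : List (List String × List String)) (transitions : Option (List String)) : Bool :=
  if places = [] then true
  else
    let ts : List String :=
      match transitions with
      | some ts => ts
      | none =>
        PySem.List.sorted
          (places.foldl (fun s p => PySem.Set.update (PySem.Set.update s p.1) p.2) PySem.Set.empty)
          (fun x => x) false
    let adj := pvBuildAdj places
    let allNodes : PySem.Set String :=
      PySem.Set.union (PySem.Set.ofList ts) ((List.range places.length).map (fun i : Nat => pvName (i : Int)))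
    match allNodes with
    | [] => true
    | s :: _ =>
      -- next(iter(all_nodes)) ported as the first element of the insertion-ordered set
      let visited := pvDfs adj (pvFuel adj s) [s] PySem.Set.empty
      -- (the trailing Python loop over `transitions` builds lists it never uses; omitted as a no-op)
      if !(PySem.Set.equal visited allNodes) then false else true

-- ===== PORT B =====
def pvStarOf (i : Int) (p : List String × List String) : PySem.Set String :=
  PySem.Set.union (PySem.Set.union (PySem.Set.ofList [pvName i]) p.1) p.2

def pvBStep (comp star : PySem.Set String) : PySem.Set String :=
  if !((PySem.Set.inter comp star).isEmpty) then PySem.Set.update comp star else comp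

def pvBRound (stars : List (PySem.Set String)) (comp : PySem.Set String) : PySem.Set String :=
  stars.foldl pvBStep comp

-- the saturation loop; runs at most (len places + 1) rounds, breaking when a round adds nothing
def pvBLoop (stars : List (PySem.Set String)) : Nat → PySem.Set String → PySem.Set String
  | 0, comp => comp
  | k + 1, comp =>
    let comp' := pvBRound stars comp
    if comp'.length = comp.length then comp' else pvBLoop stars k comp'

def check_alt (places : List (List String × List String)) (transitions : Option (List String)) : Bool :=
  if places = [] then true
  else
    let ts : List String :=
      match transitions with
      | some ts => ts
      | none =>
        places.foldl
          (fun s p => PySem.Set.union s (PySem.Set.union (PySem.Set.ofList p.1) p.2))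
          PySem.Set.empty
    let nodes : PySem.Set String :=
      PySem.Set.union (PySem.Set.ofList ts) ((List.range places.length).map (fun i : Nat => pvName (i : Int)))
    let stars := (PySem.List.enumerate places).map (fun ip => pvStarOf ip.1 ip.2)
    let comp := pvBLoop stars (places.length + 1) (PySem.Set.ofList ["p0"])
    PySem.Set.equal comp nodes

-- ===== PRECONDITION & SPEC =====
def Spec_check (places : List (List String × List String)) (transitions : Option (List String)) (out : Bool) : Prop := out = check_alt places transitions
instance (places : List (List String × List String)) (transitions : Option (List String)) (out : Bool) : Decidable (Spec_check places transitions out) := by unfold Spec_check; infer_instance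

-- ===== CLAIM (what is proved, stated in full; the proofs are below) =====
def Claim_equal_check : Prop := ∀ (places : List (List String × List String)) (transitions : Option (List String)), Dom_check places transitions → Spec_check places transitions (check places transitions)

-- ===== LEMMAS AND PROOFS =====

-- membership-level view of place i's transitions and star, and the undirected edge relation
def pvTrans (places : List (List String × List String)) (j : Nat) : List String :=
  (places.getD j ([], [])).1 ++ (places.getD j ([], [])).2

def pvStarMem (places : List (List String × List String)) (j : Nat) (x : String) : Prop :=
  x = pvName j ∨ x ∈ pvTrans places j

def pvEdge (places : List (List String × List String)) (x y : String) : Prop :=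
  ∃ j, j < places.length ∧
    ((x = pvName j ∧ y ∈ pvTrans places j) ∨ (y = pvName j ∧ x ∈ pvTrans places j))

inductive PvReach (places : List (List String × List String)) : String → String → Prop
  | refl (x : String) : PvReach places x x
  | step {x z y : String} {j : Nat} : PvReach places x z → j < places.length →
      pvStarMem places j z → pvStarMem places j y → PvReach places x y

theorem pvReach_trans {places : List (List String × List String)} {a b c : String}
    (h1 : PvReach places a b) (h2 : PvReach places b c) : PvReach places a c := by
  induction h2 with
  | refl => exact h1
  | step _ hj hz hy ih => exact PvReach.step ih hj hz hy

theorem pvReach_symm {places : List (List String × List String)} {a b : String}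
    (h : PvReach places a b) : PvReach places b a := by
  induction h with
  | refl => exact PvReach.refl _
  | step _ hj hz hy ih =>
    exact pvReach_trans (PvReach.step (PvReach.refl _) hj hy hz) ih

theorem pvEdge_symm {places : List (List String × List String)} {x y : String}
    (h : pvEdge places x y) : pvEdge places y x := by
  obtain ⟨j, hj, h⟩ := h; exact ⟨j, hj, h.symm⟩

theorem pvReach_of_edge {places : List (List String × List String)} {s x y : String}
    (hr : PvReach places s x) (he : pvEdge places x y) : PvReach places s y := by
  obtain ⟨j, hj, h⟩ := he
  rcases h with ⟨hx, hy⟩ | ⟨hy, hx⟩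
  · exact PvReach.step hr hj (Or.inl hx) (Or.inr hy)
  · exact PvReach.step hr hj (Or.inr hx) (Or.inl hy)

-- adjacency characterization
theorem mem_getD_pvAddE (d : PySem.Dict String (PySem.Set String)) (u v x y : String) :
    y ∈ (pvAddE d u v).getD x PySem.Set.empty ↔
      ((x = u ∧ y = v) ∨ y ∈ d.getD x PySem.Set.empty) := by
  unfold pvAddE
  rw [PySem.Dict.getD_modify]
  split_ifs with h
  · subst h; rw [PySem.Set.mem_add]; tauto
  · tauto

theorem mem_getD_foldIn (ts : List String) (q : String)
    (d : PySem.Dict String (PySem.Set String)) (x y : String) :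
    y ∈ (ts.foldl (fun d t => pvAddE (pvAddE d t q) q t) d).getD x PySem.Set.empty ↔
      (y ∈ d.getD x PySem.Set.empty ∨ (x = q ∧ y ∈ ts) ∨ (y = q ∧ x ∈ ts)) := by
  induction ts generalizing d with
  | nil => simp
  | cons t rest ih =>
    simp only [List.foldl_cons, ih, mem_getD_pvAddE, List.mem_cons]
    tauto

theorem mem_getD_foldOut (ts : List String) (q : String)
    (d : PySem.Dict String (PySem.Set String)) (x y : String) :
    y ∈ (ts.foldl (fun d t => pvAddE (pvAddE d q t) t q) d).getD x PySem.Set.empty ↔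
      (y ∈ d.getD x PySem.Set.empty ∨ (x = q ∧ y ∈ ts) ∨ (y = q ∧ x ∈ ts)) := by
  induction ts generalizing d with
  | nil => simp
  | cons t rest ih =>
    simp only [List.foldl_cons, ih, mem_getD_pvAddE, List.mem_cons]
    tauto

theorem mem_getD_buildFold (places : List (List String × List String)) (s : Int)
    (d : PySem.Dict String (PySem.Set String)) (x y : String) :
    y ∈ ((PySem.List.enumerate places s).foldl
          (fun adj ip =>
            let pid := pvName ip.1
            let adj := ip.2.1.foldl (fun adj t => pvAddE (pvAddE adj t pid) pid t) adj
            ip.2.2.foldl (fun adj t => pvAddE (pvAddE adj pid t) t pid) adj)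
          d).getD x PySem.Set.empty ↔
      (y ∈ d.getD x PySem.Set.empty ∨
        ∃ j : Nat, j < places.length ∧
          ((x = pvName (s + j) ∧ y ∈ pvTrans places j) ∨
           (y = pvName (s + j) ∧ x ∈ pvTrans places j))) := by
  induction places generalizing s d with
  | nil => simp [PySem.List.enumerate]
  | cons p rest ih =>
    have hcons : PySem.List.enumerate (p :: rest) s = (s, p) :: PySem.List.enumerate rest (s+1) := by
      simp [PySem.List.enumerate]
    rw [hcons, List.foldl_cons, ih]
    simp only [mem_getD_foldOut, mem_getD_foldIn]
    constructor
    · rintro (((hd | h1) | h2) | ⟨j, hj, hcase⟩)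
      · exact Or.inl hd
      · refine Or.inr ⟨0, by simp, ?_⟩
        simp only [pvTrans, List.getD_cons_zero, List.mem_append, Nat.cast_zero, add_zero]
        tauto
      · refine Or.inr ⟨0, by simp, ?_⟩
        simp only [pvTrans, List.getD_cons_zero, List.mem_append, Nat.cast_zero, add_zero]
        tauto
      · refine Or.inr ⟨j + 1, by simp only [List.length_cons]; omega, ?_⟩
        have h' : s + 1 + (j : Int) = s + ((j : Nat) + 1 : Nat) := by push_cast; ring
        rw [← h']
        simpa [pvTrans] using hcase
    · rintro (hd | ⟨j, hj, hcase⟩)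
      · exact Or.inl (Or.inl (Or.inl hd))
      · cases j with
        | zero =>
          simp only [pvTrans, List.getD_cons_zero, List.mem_append, Nat.cast_zero, add_zero] at hcase
          rcases hcase with (⟨hx, hy | hy⟩ | ⟨hy, hx | hx⟩)
          · exact Or.inl (Or.inl (Or.inr (Or.inl ⟨hx, hy⟩)))
          · exact Or.inl (Or.inr (Or.inl ⟨hx, hy⟩))
          · exact Or.inl (Or.inl (Or.inr (Or.inr ⟨hy, hx⟩)))
          · exact Or.inl (Or.inr (Or.inr ⟨hy, hx⟩))
        | succ j =>
          simp only [List.length_cons] at hj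
          refine Or.inr ⟨j, by omega, ?_⟩
          have h' : s + 1 + (j : Int) = s + ((j : Nat) + 1 : Nat) := by push_cast; ring
          rw [h']
          simpa [pvTrans] using hcase

theorem pvAdj_char (places : List (List String × List String)) (x y : String) :
    y ∈ (pvBuildAdj places).getD x PySem.Set.empty ↔ pvEdge places x y := by
  unfold pvBuildAdj pvEdge
  rw [mem_getD_buildFold]
  simp [PySem.Dict.getD_empty, PySem.Set.empty]

theorem pvAdj_keys_of_mem (places : List (List String × List String)) (x y : String)
    (h : y ∈ (pvBuildAdj places).getD x PySem.Set.empty) :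
    y ∈ (pvBuildAdj places).keys := by
  have hx : x ∈ (pvBuildAdj places).getD y PySem.Set.empty := by
    rw [pvAdj_char]; exact pvEdge_symm ((pvAdj_char places x y).1 h)
  by_contra hk
  have hc : (pvBuildAdj places).contains y = false := by
    rw [PySem.Dict.contains_eq_decide_mem_keys]; simp [hk]
  rw [PySem.Dict.getD_of_not_contains _ _ hc] at hx
  simp [PySem.Set.empty] at hx

-- if a set is edge-closed it is star-closed
theorem pvClosed_star (places : List (List String × List String)) (R : List String)
    (hcl : ∀ v ∈ R, ∀ y, pvEdge places v y → y ∈ R) :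
    ∀ j, j < places.length → ∀ z y, z ∈ R → pvStarMem places j z → pvStarMem places j y →
      y ∈ R := by
  intro j hj z y hz hsz hsy
  have hpR : pvName (j:Int) ∈ R := by
    rcases hsz with rfl | hzt
    · exact hz
    · exact hcl z hz _ ⟨j, hj, Or.inr ⟨rfl, hzt⟩⟩
  rcases hsy with rfl | hyt
  · exact hpR
  · exact hcl _ hpR y ⟨j, hj, Or.inl ⟨rfl, hyt⟩⟩

-- degree-weighted size bookkeeping for the DFS fuel
def pvSD (adj : PySem.Dict String (PySem.Set String)) (l : List String) : Nat :=
  (l.map (fun v => (adj.getD v PySem.Set.empty).length + 1)).sum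

theorem pvSD_split (adj : PySem.Dict String (PySem.Set String)) (U : List String)
    (hU : U.Nodup) (vis : PySem.Set String) (v : String) (hv : v ∈ U)
    (hc : vis.contains v = false) :
    pvSD adj (U.filter (fun x => !(PySem.Set.add vis v).contains x)) +
      ((adj.getD v PySem.Set.empty).length + 1) =
    pvSD adj (U.filter (fun x => !vis.contains x)) := by
  induction U with
  | nil => simp at hv
  | cons u t ih =>
    have hut : u ∉ t := (List.nodup_cons.1 hU).1
    have htn : t.Nodup := (List.nodup_cons.1 hU).2
    rcases List.mem_cons.1 hv with rfl | hvt
    · have h1 : (PySem.Set.add vis v).contains v = true := by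
        rw [PySem.Set.contains_iff, PySem.Set.mem_add]; tauto
      have hfc : t.filter (fun x => !(PySem.Set.add vis v).contains x) =
          t.filter (fun x => !vis.contains x) := by
        apply List.filter_congr
        intro x hx
        have hne : x ≠ v := fun h => hut (h ▸ hx)
        have : (PySem.Set.add vis v).contains x = vis.contains x := by
          rw [Bool.eq_iff_iff, PySem.Set.contains_iff, PySem.Set.contains_iff,
            PySem.Set.mem_add]
          tauto
        rw [this]
      simp only [List.filter_cons, h1, hc, Bool.not_true, Bool.not_false, if_neg, if_pos,
        Bool.false_eq_true, not_false_eq_true, hfc]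
      simp [pvSD]
      omega
    · have hne : u ≠ v := fun h => hut (h ▸ hvt)
      have h2 : (PySem.Set.add vis v).contains u = vis.contains u := by
        rw [Bool.eq_iff_iff, PySem.Set.contains_iff, PySem.Set.contains_iff, PySem.Set.mem_add]
        have : ¬ u = v := hne
        tauto
      have := ih htn hvt
      cases hcu : vis.contains u
      · simp only [List.filter_cons, h2, hcu, Bool.not_false, if_pos]
        simp only [pvSD, List.map_cons, List.sum_cons] at this ⊢
        omega
      · simp only [List.filter_cons, h2, hcu, Bool.not_true, Bool.false_eq_true,
          not_false_eq_true, if_neg]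
        exact this

theorem pvFoldl_sum (adj : PySem.Dict String (PySem.Set String)) (l : List String) (a : Nat) :
    l.foldl (fun a v => a + (adj.getD v PySem.Set.empty).length + 1) a = a + pvSD adj l := by
  induction l generalizing a with
  | nil => simp [pvSD]
  | cons x t ih => rw [List.foldl_cons, ih]; simp [pvSD]; omega

-- the DFS master lemma
theorem pvDfs_main (places : List (List String × List String))
    (adj : PySem.Dict String (PySem.Set String)) (s : String) (U : List String)
    (hU : U.Nodup)
    (hchar : ∀ x y, y ∈ adj.getD x PySem.Set.empty ↔ pvEdge places x y)
    (hKeys : ∀ x y, y ∈ adj.getD x PySem.Set.empty → y ∈ U) :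
    ∀ (fuel : Nat) (stack : List String) (visited : PySem.Set String),
      (∀ v ∈ stack, v ∈ U) → (∀ v ∈ visited, v ∈ U) →
      (∀ v ∈ stack, PvReach places s v) → (∀ v ∈ visited, PvReach places s v) →
      (∀ v ∈ visited, ∀ y, pvEdge places v y → y ∈ visited ∨ y ∈ stack) →
      stack.length + pvSD adj (U.filter (fun x => !visited.contains x)) ≤ fuel →
      (∀ v ∈ visited, v ∈ pvDfs adj fuel stack visited) ∧
      (∀ v ∈ stack, v ∈ pvDfs adj fuel stack visited) ∧
      (∀ v ∈ pvDfs adj fuel stack visited, PvReach places s v) ∧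
      (∀ v ∈ pvDfs adj fuel stack visited, ∀ y, pvEdge places v y →
          y ∈ pvDfs adj fuel stack visited) := by
  intro fuel
  induction fuel with
  | zero =>
    intro stack visited hsU hvU hsR hvR hinv hphi
    have hst : stack = [] := by
      cases stack with
      | nil => rfl
      | cons a t => simp [List.length_cons] at hphi
    subst hst
    simp only [pvDfs]
    refine ⟨fun v hv => hv, by simp, hvR, ?_⟩
    intro v hv y he
    rcases hinv v hv y he with h | h
    · exact h
    · simp at h
  | succ fuel ih =>
    intro stack visited hsU hvU hsR hvR hinv hphi
    cases stack with
    | nil =>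
      simp only [pvDfs]
      refine ⟨fun v hv => hv, by simp, hvR, ?_⟩
      intro v hv y he
      rcases hinv v hv y he with h | h
      · exact h
      · simp at h
    | cons node rest =>
      by_cases h : visited.contains node = true
      · have heq : pvDfs adj (fuel+1) (node :: rest) visited = pvDfs adj fuel rest visited := by
          rw [pvDfs.eq_def]; simp
          intro hn; exact absurd ((PySem.Set.contains_iff _ _).1 h) hn
        rw [heq]
        have hnv : node ∈ visited := (PySem.Set.contains_iff _ _).1 h
        obtain ⟨c1, c2, c3, c4⟩ := ih rest visited
          (fun v hv => hsU v (List.mem_cons_of_mem _ hv)) hvU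
          (fun v hv => hsR v (List.mem_cons_of_mem _ hv)) hvR
          (fun v hv y he => by
            rcases hinv v hv y he with h' | h'
            · exact Or.inl h'
            · rcases List.mem_cons.1 h' with rfl | h''
              · exact Or.inl hnv
              · exact Or.inr h'')
          (by simp only [List.length_cons] at hphi; omega)
        refine ⟨c1, ?_, c3, c4⟩
        intro v hv
        rcases List.mem_cons.1 hv with rfl | hv'
        · exact c1 _ hnv
        · exact c2 _ hv'
      · have hb : visited.contains node = false := by simpa using h
        have heq : pvDfs adj (fuel+1) (node :: rest) visited =
            pvDfs adj fuel
              (((adj.getD node PySem.Set.empty).filter (fun n => !(visited.contains n))) ++ rest)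
              (PySem.Set.add visited node) := by
          rw [pvDfs.eq_def]; simp
          intro hn
          have h2 := (PySem.Set.contains_iff visited node).2 hn
          rw [hb] at h2; exact absurd h2 Bool.false_ne_true
        rw [heq]
        have hnodeU : node ∈ U := hsU node List.mem_cons_self
        have hnodeR : PvReach places s node := hsR node List.mem_cons_self
        have hfiltsub : ∀ v ∈ (adj.getD node PySem.Set.empty).filter (fun n => !(visited.contains n)),
            v ∈ adj.getD node PySem.Set.empty := fun v hv => (List.mem_filter.1 hv).1
        obtain ⟨c1, c2, c3, c4⟩ := ih
          (((adj.getD node PySem.Set.empty).filter (fun n => !(visited.contains n))) ++ rest)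
          (PySem.Set.add visited node)
          (fun v hv => by
            rcases List.mem_append.1 hv with hv' | hv'
            · exact hKeys node v (hfiltsub v hv')
            · exact hsU v (List.mem_cons_of_mem _ hv'))
          (fun v hv => by
            rcases (PySem.Set.mem_add _ _ _).1 hv with hv' | rfl
            · exact hvU v hv'
            · exact hnodeU)
          (fun v hv => by
            rcases List.mem_append.1 hv with hv' | hv'
            · exact pvReach_of_edge hnodeR ((hchar node v).1 (hfiltsub v hv'))
            · exact hsR v (List.mem_cons_of_mem _ hv'))
          (fun v hv => by
            rcases (PySem.Set.mem_add _ _ _).1 hv with hv' | rfl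
            · exact hvR v hv'
            · exact hnodeR)
          (fun v hv y he => by
            rcases (PySem.Set.mem_add _ _ _).1 hv with hv' | rfl
            · rcases hinv v hv' y he with h' | h'
              · exact Or.inl ((PySem.Set.mem_add _ _ _).2 (Or.inl h'))
              · rcases List.mem_cons.1 h' with rfl | h''
                · exact Or.inl ((PySem.Set.mem_add _ _ _).2 (Or.inr rfl))
                · exact Or.inr (List.mem_append.2 (Or.inr h''))
            · have hy : y ∈ adj.getD v PySem.Set.empty := (hchar v y).2 he
              by_cases hcy : visited.contains y = true
              · exact Or.inl ((PySem.Set.mem_add _ _ _).2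
                  (Or.inl ((PySem.Set.contains_iff _ _).1 hcy)))
              · refine Or.inr (List.mem_append.2 (Or.inl (List.mem_filter.2 ⟨hy, ?_⟩)))
                simp only [Bool.not_eq_true']
                cases hcv : visited.contains y
                · rfl
                · exact absurd hcv hcy)
          (by
            have hsplit := pvSD_split adj U hU visited node hnodeU hb
            have hlf : ((adj.getD node PySem.Set.empty).filter
                (fun n => !(visited.contains n))).length ≤
                (adj.getD node PySem.Set.empty).length := List.length_filter_le _ _
            simp only [List.length_append, List.length_cons] at hphi ⊢
            omega)
        refine ⟨?_, ?_, c3, c4⟩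
        · intro v hv
          exact c1 _ ((PySem.Set.mem_add _ _ _).2 (Or.inl hv))
        · intro v hv
          rcases List.mem_cons.1 hv with rfl | hv'
          · exact c1 _ ((PySem.Set.mem_add _ _ _).2 (Or.inr rfl))
          · exact c2 _ (List.mem_append.2 (Or.inr hv'))

theorem pvA_visited_char (places : List (List String × List String)) (s : String) :
    ∀ x, x ∈ pvDfs (pvBuildAdj places) (pvFuel (pvBuildAdj places) s) [s] PySem.Set.empty ↔
      PvReach places s x := by
  intro x
  have hU : (PySem.Set.add (PySem.Set.ofList (pvBuildAdj places).keys) s).Nodup :=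
    PySem.Set.nodup_add _ _ (PySem.Set.nodup_ofList _)
  obtain ⟨c1, c2, c3, c4⟩ := pvDfs_main places (pvBuildAdj places) s _ hU
    (pvAdj_char places)
    (fun a b hb => (PySem.Set.mem_add _ _ _).2
      (Or.inl ((PySem.Set.mem_ofList _ _).2 (pvAdj_keys_of_mem places a b hb))))
    (pvFuel (pvBuildAdj places) s) [s] PySem.Set.empty
    (fun v hv => by
      rcases List.mem_cons.1 hv with rfl | h
      · exact (PySem.Set.mem_add _ _ _).2 (Or.inr rfl)
      · simp at h)
    (by simp [PySem.Set.empty])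
    (fun v hv => by
      rcases List.mem_cons.1 hv with rfl | h
      · exact PvReach.refl v
      · simp at h)
    (by simp [PySem.Set.empty])
    (by simp [PySem.Set.empty])
    (by
      have hfil : (PySem.Set.add (PySem.Set.ofList (pvBuildAdj places).keys) s).filter
          (fun x => !PySem.Set.contains PySem.Set.empty x) =
          PySem.Set.add (PySem.Set.ofList (pvBuildAdj places).keys) s := by
        apply List.filter_eq_self.2
        intro a _
        simp [PySem.Set.empty, PySem.Set.contains]
      rw [hfil]
      unfold pvFuel
      rw [pvFoldl_sum]
      simp)
  constructor
  · exact fun h => c3 x h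
  · intro hr
    induction hr with
    | refl => exact c2 s List.mem_cons_self
    | step hzr hj hz hy ih => exact pvClosed_star places _ c4 _ hj _ _ ih hz hy

-- ===== B-side lemmas =====
theorem mem_pvStarOf (i : Int) (p : List String × List String) (x : String) :
    x ∈ pvStarOf i p ↔ (x = pvName i ∨ x ∈ p.1 ∨ x ∈ p.2) := by
  unfold pvStarOf
  simp only [PySem.Set.mem_union, PySem.Set.mem_ofList, List.mem_singleton]
  tauto

theorem pvStars_eq (places : List (List String × List String)) (s : Int) :
    (PySem.List.enumerate places s).map (fun ip => pvStarOf ip.1 ip.2) =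
      (List.range places.length).map (fun j : Nat => pvStarOf (s + j) (places.getD j ([], []))) := by
  induction places generalizing s with
  | nil => simp [PySem.List.enumerate]
  | cons p t ih =>
    have hcons : PySem.List.enumerate (p :: t) s = (s, p) :: PySem.List.enumerate t (s+1) := by
      simp [PySem.List.enumerate]
    rw [hcons, List.map_cons, ih, List.length_cons, List.range_succ_eq_map, List.map_cons,
      List.map_map]
    simp only [List.getD_cons_zero, Nat.cast_zero, add_zero]
    congr 1
    apply List.map_congr_left
    intro j _
    simp only [Function.comp]
    have h' : s + 1 + (j : Int) = s + ((j + 1 : Nat) : Int) := by push_cast; ring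
    rw [h']
    simp

theorem pvStars_mem_iff (places : List (List String × List String))
    (st : PySem.Set String)
    (h : st ∈ (PySem.List.enumerate places 0).map (fun ip => pvStarOf ip.1 ip.2)) :
    ∃ j, j < places.length ∧ ∀ x, x ∈ st ↔ pvStarMem places j x := by
  rw [pvStars_eq places 0] at h
  obtain ⟨j, hj, rfl⟩ := List.mem_map.1 h
  refine ⟨j, List.mem_range.1 hj, ?_⟩
  intro x
  rw [mem_pvStarOf]
  unfold pvStarMem pvTrans
  simp only [zero_add, List.mem_append]

theorem pvStars_get (places : List (List String × List String)) (j : Nat)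
    (hj : j < places.length) :
    ∃ st ∈ (PySem.List.enumerate places 0).map (fun ip => pvStarOf ip.1 ip.2),
      ∀ x, x ∈ st ↔ pvStarMem places j x := by
  rw [pvStars_eq places 0]
  refine ⟨pvStarOf (0 + j) (places.getD j ([], [])), List.mem_map.2 ⟨j, List.mem_range.2 hj, rfl⟩, ?_⟩
  intro x
  rw [mem_pvStarOf]
  unfold pvStarMem pvTrans
  simp only [zero_add, List.mem_append]

theorem pvUpdate_exists_append (s : PySem.Set String) (xs : List String) :
    ∃ e, PySem.Set.update s xs = s ++ e := by
  have hfold : ∀ (xs : List String) (s : PySem.Set String), ∃ e, xs.foldl PySem.Set.add s = s ++ e := by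
    intro xs
    induction xs with
    | nil => exact fun s => ⟨[], by simp⟩
    | cons x t ih =>
      intro s
      obtain ⟨e, he⟩ := ih (PySem.Set.add s x)
      rw [List.foldl_cons]
      by_cases hx : x ∈ s
      · rw [PySem.Set.add_of_mem hx] at he ⊢
        exact ⟨e, he⟩
      · rw [PySem.Set.add_of_not_mem hx] at he ⊢
        exact ⟨x :: e, by rw [he, List.append_assoc]; rfl⟩
  exact hfold xs s

theorem pvBStep_exists_append (c st : PySem.Set String) : ∃ e, pvBStep c st = c ++ e := by
  unfold pvBStep
  split_ifs with h
  · exact pvUpdate_exists_append c st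
  · exact ⟨[], by simp⟩

theorem pvFoldl_bStep_exists_append (l : List (PySem.Set String)) (c : PySem.Set String) :
    ∃ e, l.foldl pvBStep c = c ++ e := by
  induction l generalizing c with
  | nil => exact ⟨[], by simp⟩
  | cons st t ih =>
    obtain ⟨e1, he1⟩ := pvBStep_exists_append c st
    obtain ⟨e2, he2⟩ := ih (pvBStep c st)
    exact ⟨e1 ++ e2, by rw [List.foldl_cons, he2, he1, List.append_assoc]⟩

theorem pvUpdate_of_subset (s : PySem.Set String) (xs : List String)
    (h : ∀ x ∈ xs, x ∈ s) : PySem.Set.update s xs = s := by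
  have hfold : ∀ (xs : List String) (s : PySem.Set String), (∀ x ∈ xs, x ∈ s) →
      xs.foldl PySem.Set.add s = s := by
    intro xs
    induction xs with
    | nil => intro s _; rfl
    | cons x t ih =>
      intro s hsub
      rw [List.foldl_cons, PySem.Set.add_of_mem (hsub x List.mem_cons_self)]
      exact ih s (fun y hy => hsub y (List.mem_cons_of_mem _ hy))
  exact hfold xs s h

theorem pvFoldl_bStep_eq_self (l : List (PySem.Set String)) (c : PySem.Set String)
    (h : l.foldl pvBStep c = c) : ∀ st ∈ l, pvBStep c st = c := by
  induction l generalizing c with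
  | nil => intro st hst; simp at hst
  | cons st t ih =>
    rw [List.foldl_cons] at h
    obtain ⟨e1, he1⟩ := pvBStep_exists_append c st
    obtain ⟨e2, he2⟩ := pvFoldl_bStep_exists_append t (pvBStep c st)
    rw [he2, he1, List.append_assoc] at h
    have hlen := congrArg List.length h
    simp only [List.length_append] at hlen
    have he1nil : e1 = [] := List.eq_nil_of_length_eq_zero (by omega)
    have he2nil : e2 = [] := List.eq_nil_of_length_eq_zero (by omega)
    have hstep : pvBStep c st = c := by rw [he1, he1nil]; simp
    intro st' hst'
    rcases List.mem_cons.1 hst' with rfl | hmem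
    · exact hstep
    · refine ih c ?_ st' hmem
      rw [hstep, he2nil] at he2
      simpa using he2

theorem pvBStep_closed (c st : PySem.Set String) (h : pvBStep c st = c)
    (hw : ∃ w ∈ c, w ∈ st) : ∀ x ∈ st, x ∈ c := by
  obtain ⟨w, hwc, hwst⟩ := hw
  have hne : PySem.Set.inter c st ≠ [] := by
    intro h0
    have hmem := (PySem.Set.mem_inter c st w).2 ⟨hwc, hwst⟩
    rw [h0] at hmem
    simp at hmem
  have hcond : (!(PySem.Set.inter c st).isEmpty) = true := by
    cases hIE : (PySem.Set.inter c st).isEmpty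
    · rfl
    · exact absurd (List.isEmpty_iff.1 hIE) hne
  unfold pvBStep at h
  rw [if_pos hcond] at h
  intro x hx
  have hmem := (PySem.Set.mem_update c st x).2 (Or.inr hx)
  rw [h] at hmem
  exact hmem

theorem pvCountP_le (l : List (PySem.Set String)) (p q : PySem.Set String → Bool)
    (hpq : ∀ x ∈ l, p x = true → q x = true) : l.countP p ≤ l.countP q := by
  induction l with
  | nil => simp
  | cons a t ih =>
    rw [List.countP_cons, List.countP_cons]
    have ht := ih (fun x hx => hpq x (List.mem_cons_of_mem _ hx))
    have ha := hpq a List.mem_cons_self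
    cases hpa : p a
    · cases q a <;> simp <;> omega
    · rw [ha hpa]; omega

theorem pvCountP_lt (l : List (PySem.Set String)) (p q : PySem.Set String → Bool)
    (hpq : ∀ x ∈ l, p x = true → q x = true)
    (hx : ∃ x ∈ l, p x = false ∧ q x = true) : l.countP p < l.countP q := by
  induction l with
  | nil => obtain ⟨x, hx, _⟩ := hx; simp at hx
  | cons a t ih =>
    rw [List.countP_cons, List.countP_cons]
    obtain ⟨x, hxmem, hpf, hqt⟩ := hx
    have htle := pvCountP_le t p q (fun y hy => hpq y (List.mem_cons_of_mem _ hy))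
    rcases List.mem_cons.1 hxmem with rfl | hxt
    · rw [hpf, hqt]; simp; omega
    · have hlt := ih (fun y hy => hpq y (List.mem_cons_of_mem _ hy)) ⟨x, hxt, hpf, hqt⟩
      have := hpq a List.mem_cons_self
      cases hpa : p a
      · cases q a <;> simp <;> omega
      · rw [this hpa]; omega

theorem pvRound_progress (l : List (PySem.Set String)) (c : PySem.Set String) :
    l.foldl pvBStep c = c ∨
      ∃ st ∈ l, (∀ x ∈ st, x ∈ l.foldl pvBStep c) ∧ ¬(∀ x ∈ st, x ∈ c) := by
  induction l generalizing c with
  | nil => left; rfl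
  | cons st t ih =>
    by_cases hc : pvBStep c st = c
    · rcases ih c with hfix | ⟨st', hmem, hsub, hnsub⟩
      · left; rw [List.foldl_cons, hc, hfix]
      · right
        exact ⟨st', List.mem_cons_of_mem _ hmem,
          (by rw [List.foldl_cons, hc]; exact hsub), hnsub⟩
    · right
      have hcond : (!(PySem.Set.inter c st).isEmpty) = true := by
        by_contra hnc
        exact hc (by unfold pvBStep; rw [if_neg hnc])
      have hup : pvBStep c st = PySem.Set.update c st := by unfold pvBStep; rw [if_pos hcond]
      refine ⟨st, List.mem_cons_self, ?_, ?_⟩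
      · intro x hx
        rw [List.foldl_cons]
        obtain ⟨e, he⟩ := pvFoldl_bStep_exists_append t (pvBStep c st)
        rw [he]
        exact List.mem_append.2 (Or.inl (by
          rw [hup]; exact (PySem.Set.mem_update c st x).2 (Or.inr hx)))
      · intro hsub
        exact hc (by rw [hup]; exact pvUpdate_of_subset c st hsub)

def pvAbs (stars : List (PySem.Set String)) (c : PySem.Set String) : Nat :=
  stars.countP (fun st => st.all (fun x => c.contains x))

theorem pvAllSub (c st : PySem.Set String) :
    st.all (fun x => PySem.Set.contains c x) = true ↔ ∀ x ∈ st, x ∈ c := by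
  simp only [List.all_eq_true]
  constructor
  · exact fun h x hx => (PySem.Set.contains_iff c x).1 (h x hx)
  · exact fun h x hx => (PySem.Set.contains_iff c x).2 (h x hx)

theorem pvBLoop_exists_append (stars : List (PySem.Set String)) (k : Nat) (c : PySem.Set String) :
    ∃ e, pvBLoop stars k c = c ++ e := by
  induction k generalizing c with
  | zero => exact ⟨[], by simp [pvBLoop]⟩
  | succ k ih =>
    obtain ⟨e1, he1⟩ := pvFoldl_bStep_exists_append stars c
    rw [pvBLoop]
    by_cases hl : (pvBRound stars c).length = c.length
    · simp only [hl, if_pos]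
      exact ⟨e1, he1⟩
    · simp only [hl, if_false]
      obtain ⟨e2, he2⟩ := ih (pvBRound stars c)
      refine ⟨e1 ++ e2, ?_⟩
      rw [he2]
      unfold pvBRound
      rw [he1, List.append_assoc]

theorem pvRound_fix_of_length (stars : List (PySem.Set String)) (c : PySem.Set String)
    (hl : (pvBRound stars c).length = c.length) : pvBRound stars c = c := by
  obtain ⟨e, he⟩ := pvFoldl_bStep_exists_append stars c
  unfold pvBRound at hl ⊢
  rw [he] at hl ⊢
  have he0 : e = [] := by
    simp only [List.length_append] at hl
    exact List.eq_nil_of_length_eq_zero (by omega)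
  simp [he0]

theorem pvBLoop_fix (stars : List (PySem.Set String)) :
    ∀ (k : Nat) (c : PySem.Set String), stars.length < k + pvAbs stars c →
      pvBRound stars (pvBLoop stars k c) = pvBLoop stars k c := by
  intro k
  induction k with
  | zero =>
    intro c hlt
    have hle : pvAbs stars c ≤ stars.length := List.countP_le_length
    omega
  | succ k ih =>
    intro c hlt
    by_cases hl : (pvBRound stars c).length = c.length
    · have hfix := pvRound_fix_of_length stars c hl
      have hres : pvBLoop stars (k+1) c = pvBRound stars c := by
        rw [pvBLoop]
        simp [hl]
      rw [hres, hfix]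
      exact hfix
    · have hres : pvBLoop stars (k+1) c = pvBLoop stars k (pvBRound stars c) := by
        rw [pvBLoop]
        simp [hl]
      rw [hres]
      have hprog := pvRound_progress stars c
      rcases hprog with h | ⟨st, hmem, hsub, hnsub⟩
      · exact absurd (congrArg List.length h) hl
      · have h1 : pvAbs stars c < pvAbs stars (pvBRound stars c) := by
          apply pvCountP_lt
          · intro st' _ hall
            rw [pvAllSub] at hall ⊢
            obtain ⟨e, he⟩ := pvFoldl_bStep_exists_append stars c
            intro x hx
            unfold pvBRound
            rw [he]
            exact List.mem_append.2 (Or.inl (hall x hx))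
          · refine ⟨st, hmem, ?_, (pvAllSub _ _).2 hsub⟩
            cases hall : st.all (fun x => PySem.Set.contains c x)
            · rfl
            · exact absurd ((pvAllSub _ _).1 hall) hnsub
        exact ih (pvBRound stars c) (by omega)

theorem pvLength_enumerate (places : List (List String × List String)) (s : Int) :
    (PySem.List.enumerate places s).length = places.length := by
  induction places generalizing s with
  | nil => simp [PySem.List.enumerate]
  | cons p t ih =>
    have hcons : PySem.List.enumerate (p :: t) s = (s, p) :: PySem.List.enumerate t (s+1) := by
      simp [PySem.List.enumerate]
    rw [hcons, List.length_cons, ih]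
    rfl

theorem pvBStep_reach (places : List (List String × List String)) (p0 : String)
    (c st : PySem.Set String) (j : Nat) (hj : j < places.length)
    (hst : ∀ x, x ∈ st ↔ pvStarMem places j x)
    (hc : ∀ x ∈ c, PvReach places p0 x) :
    ∀ x ∈ pvBStep c st, PvReach places p0 x := by
  intro x hx
  unfold pvBStep at hx
  split_ifs at hx with hcond
  · rcases (PySem.Set.mem_update c st x).1 hx with hxc | hxst
    · exact hc x hxc
    · have hne : PySem.Set.inter c st ≠ [] := by
        intro h0; rw [h0] at hcond; simp at hcond
      obtain ⟨w, hw⟩ := List.exists_mem_of_ne_nil _ hne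
      have hw' := (PySem.Set.mem_inter c st w).1 hw
      exact PvReach.step (hc w hw'.1) hj ((hst w).1 hw'.2) ((hst x).1 hxst)
  · exact hc x hx

theorem pvRound_reach (places : List (List String × List String)) (p0 : String)
    (stars : List (PySem.Set String))
    (hstars : ∀ st ∈ stars, ∃ j, j < places.length ∧ ∀ x, x ∈ st ↔ pvStarMem places j x) :
    ∀ (c : PySem.Set String), (∀ x ∈ c, PvReach places p0 x) →
      ∀ x ∈ pvBRound stars c, PvReach places p0 x := by
  induction stars with
  | nil => intro c hc x hx; exact hc x hx
  | cons st t ih =>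
    intro c hc x hx
    obtain ⟨j, hj, hst⟩ := hstars st List.mem_cons_self
    exact ih (fun st' h' => hstars st' (List.mem_cons_of_mem _ h')) (pvBStep c st)
      (pvBStep_reach places p0 c st j hj hst hc) x hx

theorem pvBLoop_reach (places : List (List String × List String)) (p0 : String)
    (stars : List (PySem.Set String))
    (hstars : ∀ st ∈ stars, ∃ j, j < places.length ∧ ∀ x, x ∈ st ↔ pvStarMem places j x) :
    ∀ (k : Nat) (c : PySem.Set String), (∀ x ∈ c, PvReach places p0 x) →
      ∀ x ∈ pvBLoop stars k c, PvReach places p0 x := by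
  intro k
  induction k with
  | zero => intro c hc x hx; exact hc x hx
  | succ k ih =>
    intro c hc x hx
    rw [pvBLoop] at hx
    by_cases hl : (pvBRound stars c).length = c.length
    · simp only [hl, if_pos] at hx
      exact pvRound_reach places p0 stars hstars c hc x hx
    · simp only [hl, if_false] at hx
      exact ih (pvBRound stars c) (pvRound_reach places p0 stars hstars c hc) x hx

theorem pvB_comp_char (places : List (List String × List String)) :
    ∀ x, x ∈ pvBLoop ((PySem.List.enumerate places 0).map (fun ip => pvStarOf ip.1 ip.2))
        (places.length + 1) (PySem.Set.ofList ["p0"]) ↔ PvReach places "p0" x := by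
  intro x
  have hlen : ((PySem.List.enumerate places 0).map (fun ip => pvStarOf ip.1 ip.2)).length =
      places.length := by rw [List.length_map, pvLength_enumerate]
  have hp0 : "p0" ∈ pvBLoop ((PySem.List.enumerate places 0).map (fun ip => pvStarOf ip.1 ip.2))
      (places.length + 1) (PySem.Set.ofList ["p0"]) := by
    obtain ⟨e, he⟩ := pvBLoop_exists_append _ (places.length + 1) (PySem.Set.ofList ["p0"])
    rw [he]
    exact List.mem_append.2 (Or.inl ((PySem.Set.mem_ofList _ _).2 (by simp)))
  have hfix : pvBRound ((PySem.List.enumerate places 0).map (fun ip => pvStarOf ip.1 ip.2))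
      (pvBLoop ((PySem.List.enumerate places 0).map (fun ip => pvStarOf ip.1 ip.2)) (places.length + 1) (PySem.Set.ofList ["p0"])) =
      pvBLoop ((PySem.List.enumerate places 0).map (fun ip => pvStarOf ip.1 ip.2)) (places.length + 1) (PySem.Set.ofList ["p0"]) := by
    apply pvBLoop_fix
    rw [hlen]
    omega
  have hclosed : ∀ j, j < places.length → ∀ z y,
      z ∈ pvBLoop ((PySem.List.enumerate places 0).map (fun ip => pvStarOf ip.1 ip.2))
        (places.length + 1) (PySem.Set.ofList ["p0"]) →
      pvStarMem places j z → pvStarMem places j y →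
      y ∈ pvBLoop ((PySem.List.enumerate places 0).map (fun ip => pvStarOf ip.1 ip.2))
        (places.length + 1) (PySem.Set.ofList ["p0"]) := by
    intro j hj z y hz hsz hsy
    obtain ⟨st, hstmem, hstiff⟩ := pvStars_get places j hj
    have hstep := pvFoldl_bStep_eq_self _ _ hfix st hstmem
    exact pvBStep_closed _ st hstep ⟨z, hz, (hstiff z).2 hsz⟩ y ((hstiff y).2 hsy)
  constructor
  · intro hx
    refine pvBLoop_reach places "p0" _ ?_ (places.length + 1) (PySem.Set.ofList ["p0"]) ?_ x hx
    · intro st hst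
      exact pvStars_mem_iff places st hst
    · intro w hw
      have hw' : w = "p0" := by
        have := (PySem.Set.mem_ofList _ _).1 hw
        simpa using this
      rw [hw']
      exact PvReach.refl _
  · intro hr
    induction hr with
    | refl => exact hp0
    | step hzr hj hz hy ih => exact hclosed _ hj _ _ ih hz hy

-- transitions / node-set membership
theorem pvA_transFold_mem (places : List (List String × List String))
    (acc : PySem.Set String) (x : String) :
    x ∈ places.foldl (fun s p => PySem.Set.update (PySem.Set.update s p.1) p.2) acc ↔
      x ∈ acc ∨ ∃ p ∈ places, x ∈ p.1 ∨ x ∈ p.2 := by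
  induction places generalizing acc with
  | nil => simp
  | cons p t ih =>
    rw [List.foldl_cons, ih]
    simp only [PySem.Set.mem_update, List.mem_cons]
    constructor
    · rintro (((h | h) | h) | ⟨q, hq, hx⟩)
      · exact Or.inl h
      · exact Or.inr ⟨p, Or.inl rfl, Or.inl h⟩
      · exact Or.inr ⟨p, Or.inl rfl, Or.inr h⟩
      · exact Or.inr ⟨q, Or.inr hq, hx⟩
    · rintro (h | ⟨q, rfl | hq, hx⟩)
      · exact Or.inl (Or.inl (Or.inl h))
      · rcases hx with h | h
        · exact Or.inl (Or.inl (Or.inr h))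
        · exact Or.inl (Or.inr h)
      · exact Or.inr ⟨q, hq, hx⟩

theorem pvB_transFold_mem (places : List (List String × List String))
    (acc : PySem.Set String) (x : String) :
    x ∈ places.foldl (fun s p => PySem.Set.union s (PySem.Set.union (PySem.Set.ofList p.1) p.2)) acc ↔
      x ∈ acc ∨ ∃ p ∈ places, x ∈ p.1 ∨ x ∈ p.2 := by
  induction places generalizing acc with
  | nil => simp
  | cons p t ih =>
    rw [List.foldl_cons, ih]
    simp only [PySem.Set.mem_union, PySem.Set.mem_ofList, List.mem_cons]
    constructor
    · rintro ((h | (h | h)) | ⟨q, hq, hx⟩)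
      · exact Or.inl h
      · exact Or.inr ⟨p, Or.inl rfl, Or.inl h⟩
      · exact Or.inr ⟨p, Or.inl rfl, Or.inr h⟩
      · exact Or.inr ⟨q, Or.inr hq, hx⟩
    · rintro (h | ⟨q, rfl | hq, hx⟩)
      · exact Or.inl (Or.inl h)
      · rcases hx with h | h
        · exact Or.inl (Or.inr (Or.inl h))
        · exact Or.inl (Or.inr (Or.inr h))
      · exact Or.inr ⟨q, hq, hx⟩

theorem pvA_transSet_mem (places : List (List String × List String)) (x : String) :
    x ∈ PySem.List.sorted
        (places.foldl (fun s p => PySem.Set.update (PySem.Set.update s p.1) p.2) PySem.Set.empty)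
        (fun x => x) false ↔
      ∃ p ∈ places, x ∈ p.1 ∨ x ∈ p.2 := by
  rw [PySem.List.mem_sorted, pvA_transFold_mem]
  simp [PySem.Set.empty]

theorem pvB_transSet_mem (places : List (List String × List String)) (x : String) :
    x ∈ places.foldl (fun s p => PySem.Set.union s (PySem.Set.union (PySem.Set.ofList p.1) p.2))
          PySem.Set.empty ↔
      ∃ p ∈ places, x ∈ p.1 ∨ x ∈ p.2 := by
  rw [pvB_transFold_mem]
  simp [PySem.Set.empty]

theorem pvName_zero : pvName 0 = "p0" := by decide

-- the start-node-invariance glue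
theorem pvGlue (places : List (List String × List String)) (s p0 : String)
    (V C N N' : PySem.Set String)
    (HV : ∀ x, x ∈ V ↔ PvReach places s x) (HC : ∀ x, x ∈ C ↔ PvReach places p0 x)
    (HN : ∀ x, x ∈ N ↔ x ∈ N') (hs : s ∈ N) (hp : p0 ∈ N') :
    PySem.Set.equal V N = PySem.Set.equal C N' := by
  have hA' : ∀ (h : ∀ x, x ∈ V ↔ x ∈ N) (x : String), PvReach places s x ↔ x ∈ N :=
    fun h x => ⟨fun hr => (h x).1 ((HV x).2 hr), fun hn => (HV x).1 ((h x).2 hn)⟩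
  have hB' : ∀ (h : ∀ x, x ∈ C ↔ x ∈ N') (x : String), PvReach places p0 x ↔ x ∈ N' :=
    fun h x => ⟨fun hr => (h x).1 ((HC x).2 hr), fun hn => (HC x).1 ((h x).2 hn)⟩
  rw [Bool.eq_iff_iff, PySem.Set.equal_iff, PySem.Set.equal_iff]
  constructor
  · intro hA x
    have hAr := hA' hA
    have hsp0 : PvReach places s p0 := (hAr p0).2 ((HN p0).2 hp)
    rw [HC]
    constructor
    · intro hr
      exact (HN x).1 ((hAr x).1 (pvReach_trans hsp0 hr))
    · intro hx
      exact pvReach_trans (pvReach_symm hsp0) ((hAr x).2 ((HN x).2 hx))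
  · intro hB x
    have hBr := hB' hB
    have hps : PvReach places p0 s := (hBr s).2 ((HN s).1 hs)
    rw [HV]
    constructor
    · intro hr
      exact (HN x).2 ((hBr x).1 (pvReach_trans hps hr))
    · intro hx
      exact pvReach_trans (pvReach_symm hps) ((hBr x).2 ((HN x).1 hx))

set_option maxHeartbeats 1000000 in
theorem pvMain (places : List (List String × List String)) (hpl : places ≠ [])
    (tsA tsB : List String) (hts : ∀ x, x ∈ tsA ↔ x ∈ tsB) :
    (match (PySem.Set.union (PySem.Set.ofList tsA)
        ((List.range places.length).map (fun i : Nat => pvName (i : Int))) : PySem.Set String) with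
     | [] => true
     | s :: _ =>
        if !(PySem.Set.equal
              (pvDfs (pvBuildAdj places) (pvFuel (pvBuildAdj places) s) [s] PySem.Set.empty)
              (PySem.Set.union (PySem.Set.ofList tsA)
                ((List.range places.length).map (fun i : Nat => pvName (i : Int))))) then false else true) =
      PySem.Set.equal
        (pvBLoop ((PySem.List.enumerate places 0).map (fun ip => pvStarOf ip.1 ip.2))
          (places.length + 1) (PySem.Set.ofList ["p0"]))
        (PySem.Set.union (PySem.Set.ofList tsB)
          ((List.range places.length).map (fun i : Nat => pvName (i : Int)))) := by
  have hlenpos : 0 < places.length := by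
    cases places with
    | nil => exact absurd rfl hpl
    | cons a t => simp
  have hp0A : "p0" ∈ (PySem.Set.union (PySem.Set.ofList tsA)
      ((List.range places.length).map (fun i : Nat => pvName (i : Int))) : PySem.Set String) := by
    apply (PySem.Set.mem_union _ _ _).2
    right
    exact List.mem_map.2 ⟨0, List.mem_range.2 hlenpos, by rw [Nat.cast_zero, pvName_zero]⟩
  have hp0B : "p0" ∈ (PySem.Set.union (PySem.Set.ofList tsB)
      ((List.range places.length).map (fun i : Nat => pvName (i : Int))) : PySem.Set String) := by
    apply (PySem.Set.mem_union _ _ _).2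
    right
    exact List.mem_map.2 ⟨0, List.mem_range.2 hlenpos, by rw [Nat.cast_zero, pvName_zero]⟩
  rcases hshape : (PySem.Set.union (PySem.Set.ofList tsA)
      ((List.range places.length).map (fun i : Nat => pvName (i : Int))) : PySem.Set String) with _ | ⟨s, rest⟩
  · rw [hshape] at hp0A
    simp at hp0A
  · have hHN : ∀ x, x ∈ s :: rest ↔ x ∈ (PySem.Set.union (PySem.Set.ofList tsB)
        ((List.range places.length).map (fun i : Nat => pvName (i : Int))) : PySem.Set String) := by
      intro x
      rw [← hshape, PySem.Set.mem_union, PySem.Set.mem_union, PySem.Set.mem_ofList,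
        PySem.Set.mem_ofList]
      rw [hts x]
    have hs : s ∈ s :: rest := List.mem_cons_self
    have hcharS := pvA_visited_char places s
    have hcomp := pvB_comp_char places
    dsimp only
    generalize hC : pvBLoop ((PySem.List.enumerate places 0).map (fun ip => pvStarOf ip.1 ip.2))
        (places.length + 1) (PySem.Set.ofList ["p0"]) = C at hcomp ⊢
    generalize hV : pvDfs (pvBuildAdj places) (pvFuel (pvBuildAdj places) s) [s]
        PySem.Set.empty = V at hcharS ⊢
    have hglue := pvGlue places s "p0" V C (s :: rest)
      (PySem.Set.union (PySem.Set.ofList tsB) ((List.range places.length).map (fun i : Nat => pvName (i : Int))))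
      hcharS hcomp hHN hs hp0B
    rw [← hglue]
    cases hb : PySem.Set.equal V (s :: rest) <;> simp

-- ===== VERDICT (by name: the statement is the Claim_ definition above) =====
theorem check_spec : Claim_equal_check := by
  intro places transitions _hdom
  unfold Spec_check check check_alt
  by_cases hpl : places = []
  · rw [if_pos hpl, if_pos hpl]
  · rw [if_neg hpl, if_neg hpl]
    cases transitions with
    | none =>
      exact pvMain places hpl _ _
        (fun x => (pvA_transSet_mem places x).trans (pvB_transSet_mem places x).symm)
    | some ts =>
      exact pvMain places hpl ts ts (fun x => Iff.rfl)
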